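-- pv_equiv track=rewrite | github.com/max-zelinski/chat-comprehension-bot | app.py | add_timestamps_to_text
-- ===== SOURCE A (Python) =====
-- def add_timestamps_to_text(text, speech_marks):
--     words = text.split()
--     response_with_timestamps = ''
--     for i, word in enumerate(words):
--         if i < len(speech_marks):
--             timestamp = speech_marks[i]['time']
--             response_with_timestamps += f"{word}[{timestamp}ms] "
--         else:
--             response_with_timestamps += f"{word} "
--     return response_with_timestamps.strip()
-- ===== SOURCE B (Python) =====
-- def add_timestamps_to_text(text, speech_marks):
--     words = text.split()
--     base = ' '.join(words)
--     # character offsets in base right after each word that gets a tag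
--     ends = []
--     pos = 0
--     for w in words[:len(speech_marks)]:
--         pos += len(w)
--         ends.append(pos)
--         pos += 1
--     # splice the tags into base back-to-front so earlier offsets stay valid
--     for end, mark in zip(reversed(ends), reversed(speech_marks[:len(ends)])):
--         base = base[:end] + f"[{mark['time']}ms]" + base[end:]
--     return base
-- ===== Notes on version B (the rewrite author's own statement) =====
-- stated objective: alternative
-- what changed: Instead of A's single enumerate loop that formats each word (tagged or plain) into an accumulator and strips a trailing space, B first joins the split words into the normalized sentence, computes the character offset right after each of the first len(speech_marks) words by a cumulative-length pass, and then splices the '[Tms]' tags into that one string back-to-front at those offsets.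
import Mathlib
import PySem

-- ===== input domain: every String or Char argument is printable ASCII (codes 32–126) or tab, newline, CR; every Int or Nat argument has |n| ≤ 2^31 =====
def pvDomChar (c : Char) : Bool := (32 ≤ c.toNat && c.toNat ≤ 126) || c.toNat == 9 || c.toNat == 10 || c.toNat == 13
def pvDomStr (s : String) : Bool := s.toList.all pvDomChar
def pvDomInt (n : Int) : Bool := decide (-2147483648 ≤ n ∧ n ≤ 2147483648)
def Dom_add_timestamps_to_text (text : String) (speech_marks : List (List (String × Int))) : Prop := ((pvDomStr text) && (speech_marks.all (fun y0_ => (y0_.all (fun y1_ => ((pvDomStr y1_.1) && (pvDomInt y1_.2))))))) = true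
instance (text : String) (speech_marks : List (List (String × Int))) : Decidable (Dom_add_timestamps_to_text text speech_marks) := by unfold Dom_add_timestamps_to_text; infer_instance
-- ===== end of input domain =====

-- B replaces A's enumerate loop (conditional tagged/plain accumulation plus a final strip) by a
-- splice algorithm: join the words, compute the character offset after each of the first
-- len(speech_marks) words, then insert the "[Tms]" tags into that one string back-to-front.


-- ===== PORT A =====
-- A's loop over enumerate(words): on i < len(speech_marks) append f"{word}[{timestamp}ms] ",
-- else f"{word} "; finally .strip().  The char-list literal ['m','s',']',' '] is "ms] ".
-- speech_marks[i]['time'] raising KeyError is excluded by Pre_; the .getD 0 default is never reached there.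
def add_timestamps_to_text (text : String) (speech_marks : List (List (String × Int))) : String :=
  let words := PySem.Str.split₀ text
  let response_with_timestamps := (PySem.List.enumerate words).foldl
    (fun acc iw =>
      if iw.1 < PySem.List.len speech_marks then
        let mark := PySem.List.pyGetD speech_marks iw.1 []
        let timestamp := ((PySem.Dict.mk mark).get? "time").getD 0
        acc ++ (iw.2.toList ++ '[' :: (PySem.Int.toChars timestamp ++ ['m', 's', ']', ' ']))
      else acc ++ (iw.2.toList ++ [' '])) ([] : List Char)
  String.ofList (PySem.Chars.strip response_with_timestamps)

-- ===== PORT B =====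
-- Source B: base = ' '.join(text.split()); one loop accumulating (ends, pos) — the offset right after
-- each of the first len(speech_marks) words — then a loop over zip(reversed(ends),
-- reversed(speech_marks[:len(ends)])) splicing base = base[:end] + f"[{mark['time']}ms]" + base[end:].
def add_timestamps_to_text_alt (text : String) (speech_marks : List (List (String × Int))) : String :=
  let words := PySem.Str.split₀ text
  let base := PySem.Chars.join [' '] (words.map String.toList)
  let st := (PySem.List.slice words none (some (PySem.List.len speech_marks))).foldl
    (fun (st : List Int × Int) w => (st.1 ++ [st.2 + PySem.Str.len w], st.2 + PySem.Str.len w + 1))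
    ([], 0)
  let ends := st.1
  let base := (ends.reverse.zip (PySem.List.slice speech_marks none (some (PySem.List.len ends))).reverse).foldl
    (fun b em =>
      PySem.List.slice b none (some em.1) ++
        ('[' :: (PySem.Int.toChars (((PySem.Dict.mk em.2).get? "time").getD 0) ++ ['m', 's', ']'])) ++
        PySem.List.slice b (some em.1) none) base
  String.ofList base

-- ===== PRECONDITION & SPEC =====
-- Pre_ excludes exactly the inputs on which Python A raises KeyError: some mark paired with a word
-- (i.e. among the first min(len(words), len(speech_marks)) marks) has no "time" key.  B raises there too.
def Pre_add_timestamps_to_text (text : String) (speech_marks : List (List (String × Int))) : Prop :=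
  (((PySem.Str.split₀ text).zip speech_marks).all
    (fun wm => (PySem.Dict.mk wm.2).contains "time")) = true
instance (text : String) (speech_marks : List (List (String × Int))) : Decidable (Pre_add_timestamps_to_text text speech_marks) := by unfold Pre_add_timestamps_to_text; infer_instance
def pvWitness_add_timestamps_to_text : String × (List (List (String × Int))) :=
  ("hi there you", [[("time", 5)], [("time", 70)]])
def Spec_add_timestamps_to_text (text : String) (speech_marks : List (List (String × Int))) (out : String) : Prop := out = add_timestamps_to_text_alt text speech_marks
instance (text : String) (speech_marks : List (List (String × Int))) (out : String) : Decidable (Spec_add_timestamps_to_text text speech_marks out) := by unfold Spec_add_timestamps_to_text; infer_instance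

-- ===== CLAIM (what is proved, stated in full; the proofs are below) =====
def Claim_equal_add_timestamps_to_text : Prop := ∀ (text : String) (speech_marks : List (List (String × Int))), Dom_add_timestamps_to_text text speech_marks → Pre_add_timestamps_to_text text speech_marks → Spec_add_timestamps_to_text text speech_marks (add_timestamps_to_text text speech_marks)

-- ===== LEMMAS AND PROOFS =====

-- the tag B splices in for one mark
def pvTagOf (m : List (String × Int)) : List Char :=
  '[' :: (PySem.Int.toChars (((PySem.Dict.mk m).get? "time").getD 0) ++ ['m', 's', ']'])

-- the tagged piece for one (word, mark) pair
def pvTag (wm : String × List (String × Int)) : List Char := wm.1.toList ++ pvTagOf wm.2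

-- A's pieces: tagged prefix, then the plain suffix
def pvPieces (ws : List String) (sm : List (List (String × Int))) : List (List Char) :=
  (ws.zip sm).map pvTag ++ (ws.drop sm.length).map String.toList

-- the offsets B's first loop computes, at spec level (Nat)
def pvEndsW : List String → Nat → List Nat
  | [], _ => []
  | w :: ws, p => (p + w.toList.length) :: pvEndsW ws (p + w.toList.length + 1)

-- the total width a word list contributes (second component of B's first loop state)
def pvWeightW : List String → Nat
  | [] => 0
  | w :: ws => w.toList.length + 1 + pvWeightW ws

-- B's second loop, at spec level: splice each tag in, last offset first (= foldr over the pairs)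
def pvSpliceAll (ps : List (Nat × List (String × Int))) (b : List Char) : List Char :=
  ps.foldr (fun em b => b.take em.1 ++ pvTagOf em.2 ++ b.drop em.1) b

-- ---------- A-side lemmas ----------

-- every word split() produces is nonempty and whitespace-free (invariant of split₀.go)
theorem pv_split₀_go_words (s cur : List Char) (acc : List (List Char))
    (hcur : ∀ c ∈ cur, PySem.Chars.isspace c = false)
    (hacc : ∀ w ∈ acc, w ≠ [] ∧ ∀ c ∈ w, PySem.Chars.isspace c = false) :
    ∀ w ∈ PySem.Chars.split₀.go s cur acc, w ≠ [] ∧ ∀ c ∈ w, PySem.Chars.isspace c = false := by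
  induction s generalizing cur acc with
  | nil =>
    rw [PySem.Chars.split₀.go.eq_def]
    dsimp only
    split_ifs with h <;> intro w hw
    · exact hacc w (List.mem_reverse.mp hw)
    · rw [List.reverse_cons] at hw
      rcases List.mem_append.mp hw with h1 | h1
      · exact hacc w (List.mem_reverse.mp h1)
      · have h1' : w = cur.reverse := by simpa using h1
        subst h1'
        refine ⟨by simpa [List.isEmpty_iff] using h, ?_⟩
        intro c hc; exact hcur c (List.mem_reverse.mp hc)
  | cons c rest ih =>
    rw [PySem.Chars.split₀.go.eq_def]
    by_cases hs : PySem.Chars.isspace c = true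
    · simp only [hs, if_true]
      by_cases he : cur.isEmpty = true
      · simp only [he, if_true]; exact ih [] acc (by simp) hacc
      · simp only [he]
        refine ih [] _ (by simp) ?_
        intro w hw
        rcases List.mem_cons.mp hw with h1 | h1
        · subst h1
          refine ⟨by simpa [List.isEmpty_iff] using he, ?_⟩
          intro d hd; exact hcur d (List.mem_reverse.mp hd)
        · exact hacc w h1
    · simp only [hs]
      refine ih (c :: cur) acc ?_ hacc
      intro d hd
      rcases List.mem_cons.mp hd with h1 | h1
      · subst h1; simpa using hs
      · exact hcur d h1

theorem pv_split₀_words (cs : List Char) :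
    ∀ w ∈ PySem.Chars.split₀ cs, w ≠ [] ∧ ∀ c ∈ w, PySem.Chars.isspace c = false :=
  pv_split₀_go_words cs [] [] (by simp) (by simp)

-- A's accumulation loop, characterised: tagged prefix (zip) followed by the plain suffix,
-- each piece followed by one space
theorem pv_foldA (sm : List (List (String × Int))) (ws : List String) (s : Nat) (acc : List Char) :
    (PySem.List.enumerate ws (s : Int)).foldl
      (fun acc iw =>
        if iw.1 < PySem.List.len sm then
          acc ++ (iw.2.toList ++ '[' ::
            (PySem.Int.toChars (((PySem.Dict.mk (PySem.List.pyGetD sm iw.1 [])).get? "time").getD 0)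
              ++ ['m', 's', ']', ' ']))
        else acc ++ (iw.2.toList ++ [' '])) acc
    = acc ++ (ws.zip (sm.drop s)).flatMap (fun wm => pvTag wm ++ [' '])
        ++ (ws.drop (sm.drop s).length).flatMap (fun w => w.toList ++ [' ']) := by
  induction ws generalizing s acc with
  | nil => simp [PySem.List.enumerate_nil]
  | cons w ws ih =>
    rw [PySem.List.enumerate_cons, List.foldl_cons]
    by_cases h : s < sm.length
    · have hcond : ((s : Int), w).1 < PySem.List.len sm := by
        simp [PySem.List.len_eq]; exact_mod_cast h
      rw [if_pos hcond]
      have hget : PySem.List.pyGetD sm ((s : Int), w).1 [] = sm[s] := by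
        simp [PySem.List.pyGetD_natCast, List.getElem?_eq_getElem h]
      rw [hget]
      have hs1 : ((s : Int) + 1) = ((s + 1 : Nat) : Int) := by push_cast; ring
      rw [hs1, ih (s + 1)]
      rw [List.drop_eq_getElem_cons h]
      have hlen : (sm[s] :: sm.drop (s + 1)).length = (sm.drop (s + 1)).length + 1 := by
        simp only [List.length_cons]
      rw [hlen, List.zip_cons_cons, List.flatMap_cons, List.drop_succ_cons]
      simp [pvTag, pvTagOf, List.append_assoc]
    · have hcond : ¬ (((s : Int), w).1 < PySem.List.len sm) := by
        simp only [PySem.List.len_eq]; exact_mod_cast h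
      rw [if_neg hcond]
      have hs1 : ((s : Int) + 1) = ((s + 1 : Nat) : Int) := by push_cast; ring
      rw [hs1, ih (s + 1)]
      have hd : sm.drop s = [] := List.drop_eq_nil_of_le (by omega)
      have hd1 : sm.drop (s + 1) = [] := List.drop_eq_nil_of_le (by omega)
      rw [hd, hd1]
      simp [List.append_assoc]

-- flatMap with trailing spaces = join with separating spaces, plus one trailing space
theorem pv_flat_eq_join (ps : List (List Char)) (h : ps ≠ []) :
    ps.flatMap (fun p => p ++ [' ']) = PySem.Chars.join [' '] ps ++ [' '] := by
  induction ps with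
  | nil => exact absurd rfl h
  | cons p rest ih =>
    cases rest with
    | nil => simp [PySem.Chars.join_singleton]
    | cons q rest' =>
      rw [List.flatMap_cons, ih (by simp), PySem.Chars.join_cons_cons]
      simp [List.append_assoc]

theorem pv_join_head (p : List Char) (rest : List (List Char)) :
    ∃ L, PySem.Chars.join [' '] (p :: rest) = p ++ L := by
  cases rest with
  | nil => exact ⟨[], by simp [PySem.Chars.join_singleton]⟩
  | cons q rest' =>
    refine ⟨[' '] ++ PySem.Chars.join [' '] (q :: rest'), ?_⟩
    rw [PySem.Chars.join_cons_cons]; simp [List.append_assoc]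

theorem pv_join_last (ps : List (List Char)) (h : ps ≠ []) :
    ∃ K, PySem.Chars.join [' '] ps = K ++ ps.getLast h := by
  induction ps with
  | nil => exact absurd rfl h
  | cons p rest ih =>
    cases rest with
    | nil => exact ⟨[], by simp [PySem.Chars.join_singleton]⟩
    | cons q rest' =>
      obtain ⟨K, hK⟩ := ih (by simp)
      refine ⟨p ++ [' '] ++ K, ?_⟩
      rw [PySem.Chars.join_cons_cons, hK, List.getLast_cons (by simp : q :: rest' ≠ [])]
      simp [List.append_assoc]

theorem pv_lstrip_cons {c : Char} (xs : List Char) (h : PySem.Chars.isspace c = false) :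
    PySem.Chars.lstrip (c :: xs) = c :: xs := by
  simp [PySem.Chars.lstrip, h]

theorem pv_rstrip_space (xs : List Char) :
    PySem.Chars.rstrip (xs ++ [' ']) = PySem.Chars.rstrip xs := by
  simp [PySem.Chars.rstrip, show PySem.Chars.isspace ' ' = true from by decide]

theorem pv_rstrip_last {c : Char} (xs : List Char) (h : PySem.Chars.isspace c = false) :
    PySem.Chars.rstrip (xs ++ [c]) = xs ++ [c] := by
  simp [PySem.Chars.rstrip, h]

-- the key strip/join identity: stripping the space-terminated concatenation gives the join,
-- provided the first piece starts and the last piece ends with a non-space character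
theorem pv_strip_join (ps : List (List Char))
    (h1 : ∀ p, ps.head? = some p → ∃ c L, p = c :: L ∧ PySem.Chars.isspace c = false)
    (h2 : ∀ p, ps.getLast? = some p → ∃ K c, p = K ++ [c] ∧ PySem.Chars.isspace c = false) :
    PySem.Chars.strip (ps.flatMap (fun p => p ++ [' '])) = PySem.Chars.join [' '] ps := by
  cases ps with
  | nil => decide
  | cons p rest =>
    have hne : (p :: rest) ≠ [] := by simp
    rw [pv_flat_eq_join _ hne]
    obtain ⟨c, L, hp, hc⟩ := h1 p rfl
    obtain ⟨L', hL'⟩ := pv_join_head p rest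
    obtain ⟨K, c', hlast, hc'⟩ := h2 _ (List.getLast?_eq_some_getLast hne)
    obtain ⟨K', hK'⟩ := pv_join_last _ hne
    have hjoin_head : PySem.Chars.join [' '] (p :: rest) = c :: (L ++ L') := by
      rw [hL', hp]; simp
    have hjoin_last : PySem.Chars.join [' '] (p :: rest) = (K' ++ K) ++ [c'] := by
      rw [hK', hlast]; simp [List.append_assoc]
    unfold PySem.Chars.strip
    have hl : PySem.Chars.lstrip (PySem.Chars.join [' '] (p :: rest) ++ [' '])
        = PySem.Chars.join [' '] (p :: rest) ++ [' '] := by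
      rw [hjoin_head]; exact pv_lstrip_cons _ hc
    rw [hl, pv_rstrip_space, hjoin_last, pv_rstrip_last _ hc']

-- non-space head / non-space tail of the pieces list
theorem pv_pieces_head (words : List String) (sm : List (List (String × Int)))
    (hw : ∀ w ∈ words, w.toList ≠ [] ∧ ∀ c ∈ w.toList, PySem.Chars.isspace c = false) :
    ∀ p, (pvPieces words sm).head? = some p →
      ∃ c L, p = c :: L ∧ PySem.Chars.isspace c = false := by
  intro p hp
  unfold pvPieces at hp
  rw [List.head?_append] at hp
  cases hz : words.zip sm with
  | cons wm rest =>
    rw [hz] at hp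
    simp only [List.map_cons, List.head?_cons, Option.some_or, Option.some.injEq] at hp
    have hmem : wm.1 ∈ words := (List.of_mem_zip (by rw [hz]; exact List.mem_cons_self ..)).1
    obtain ⟨hne', hns⟩ := hw _ hmem
    obtain ⟨c, L, hCL⟩ := List.exists_cons_of_ne_nil hne'
    refine ⟨c, L ++ pvTagOf wm.2, ?_, ?_⟩
    · rw [← hp]; simp [pvTag, hCL]
    · exact hns c (by rw [hCL]; exact List.mem_cons_self ..)
  | nil =>
    rw [hz] at hp
    cases hd : words.drop sm.length with
    | nil => rw [hd] at hp; simp at hp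
    | cons w rest =>
      rw [hd] at hp
      simp only [List.map_nil, List.head?_nil, List.map_cons, List.head?_cons, Option.none_or,
        Option.some.injEq] at hp
      have hmem : w ∈ words := List.mem_of_mem_drop (by rw [hd]; exact List.mem_cons_self ..)
      obtain ⟨hne', hns⟩ := hw _ hmem
      obtain ⟨c, L, hCL⟩ := List.exists_cons_of_ne_nil hne'
      exact ⟨c, L, by rw [← hp, hCL], hns c (by rw [hCL]; exact List.mem_cons_self ..)⟩

theorem pv_pieces_last (words : List String) (sm : List (List (String × Int)))
    (hw : ∀ w ∈ words, w.toList ≠ [] ∧ ∀ c ∈ w.toList, PySem.Chars.isspace c = false) :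
    ∀ p, (pvPieces words sm).getLast? = some p →
      ∃ K c, p = K ++ [c] ∧ PySem.Chars.isspace c = false := by
  intro p hp
  unfold pvPieces at hp
  rw [List.getLast?_append] at hp
  cases hlp : ((words.drop sm.length).map String.toList).getLast? with
  | some q =>
    rw [hlp] at hp
    simp only [Option.some_or, Option.some.injEq] at hp
    obtain ⟨w, hwmem, hweq⟩ := List.mem_map.mp (List.mem_of_getLast? hlp)
    obtain ⟨hne', hns⟩ := hw w (List.mem_of_mem_drop hwmem)
    obtain rfl : p = w.toList := (hweq.trans hp).symm
    exact ⟨w.toList.dropLast, w.toList.getLast hne', (List.dropLast_append_getLast hne').symm,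
      hns _ (List.getLast_mem hne')⟩
  | none =>
    rw [hlp] at hp
    simp only [Option.none_or] at hp
    obtain ⟨wm, hwm, hweq⟩ := List.mem_map.mp (List.mem_of_getLast? hp)
    refine ⟨wm.1.toList ++ '[' :: (PySem.Int.toChars (((PySem.Dict.mk wm.2).get? "time").getD 0) ++ ['m', 's']), ']', ?_, by decide⟩
    rw [← hweq]
    simp [pvTag, pvTagOf]

-- A's result, characterised: the join of the pieces
theorem pv_A_eq (text : String) (sm : List (List (String × Int))) :
    add_timestamps_to_text text sm
      = String.ofList (PySem.Chars.join [' '] (pvPieces (PySem.Str.split₀ text) sm)) := by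
  unfold add_timestamps_to_text
  simp only []
  set words := PySem.Str.split₀ text with hwords
  have hw : ∀ w ∈ words, w.toList ≠ [] ∧ ∀ c ∈ w.toList, PySem.Chars.isspace c = false := by
    intro w hwmem
    rw [hwords, PySem.Str.split₀] at hwmem
    obtain ⟨cs, hcs, hceq⟩ := List.mem_map.mp hwmem
    obtain ⟨h1, h2⟩ := pv_split₀_words text.toList cs hcs
    subst hceq
    simpa [String.toList_ofList] using ⟨h1, h2⟩
  have hfold := pv_foldA sm words 0 []
  simp only [Nat.cast_zero] at hfold
  rw [hfold]
  simp only [List.drop_zero, List.nil_append]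
  have hpieces :
      (words.zip sm).flatMap (fun wm => pvTag wm ++ [' ']) ++ (words.drop sm.length).flatMap (fun w => w.toList ++ [' '])
      = (pvPieces words sm).flatMap (fun p => p ++ [' ']) := by
    unfold pvPieces
    rw [List.flatMap_append, List.flatMap_map, List.flatMap_map]
  rw [hpieces, pv_strip_join _ (pv_pieces_head words sm hw) (pv_pieces_last words sm hw)]

-- ---------- B-side lemmas ----------

theorem pv_endsW_length (L : List String) (p : Nat) : (pvEndsW L p).length = L.length := by
  induction L generalizing p with
  | nil => rfl
  | cons w ws ih => simp [pvEndsW, ih]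

theorem pv_endsW_shift (L : List String) (c p : Nat) :
    pvEndsW L (c + p) = (pvEndsW L p).map (fun n => c + n) := by
  induction L generalizing p with
  | nil => rfl
  | cons w ws ih =>
    simp only [pvEndsW, List.map_cons]
    have h1 : c + p + w.toList.length = c + (p + w.toList.length) := by omega
    have h2 : c + p + w.toList.length + 1 = c + (p + w.toList.length + 1) := by omega
    rw [h2, h1, ih]

-- B's first loop computes exactly the offsets pvEndsW describes
theorem pv_fold1 (wk : List String) (acc : List Int) (p : Nat) :
    (wk.foldl
      (fun (st : List Int × Int) w => (st.1 ++ [st.2 + PySem.Str.len w], st.2 + PySem.Str.len w + 1))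
      (acc, (p : Int)))
    = (acc ++ (pvEndsW wk p).map (fun n : Nat => (n : Int)), ((p + pvWeightW wk : Nat) : Int)) := by
  induction wk generalizing acc p with
  | nil => simp [pvEndsW, pvWeightW]
  | cons w ws ih =>
    rw [List.foldl_cons]
    have hlen : PySem.Str.len w = ((w.toList.length : Nat) : Int) := by
      simp [PySem.Str.len_eq]
    have h1 : (p : Int) + PySem.Str.len w = ((p + w.toList.length : Nat) : Int) := by
      rw [hlen]; push_cast; ring
    have h2 : (p : Int) + PySem.Str.len w + 1 = ((p + w.toList.length + 1 : Nat) : Int) := by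
      rw [hlen]; push_cast; ring
    rw [h2, h1, ih]
    simp only [pvEndsW, pvWeightW, List.map_cons, List.append_assoc, List.singleton_append,
      Prod.mk.injEq]
    constructor
    · trivial
    · congr 1
      omega

-- zipping two reversed lists of equal length is the reversed zip
theorem pv_zip_reverse {α β : Type} (l : List α) (r : List β) (h : l.length = r.length) :
    l.reverse.zip r.reverse = (l.zip r).reverse := by
  induction l generalizing r with
  | nil =>
    cases r with
    | nil => rfl
    | cons b r' => simp at h
  | cons a l' ih =>
    cases r with
    | nil => simp at h
    | cons b r' =>
      simp only [List.length_cons, Nat.succ_inj] at h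
      simp only [List.reverse_cons, List.zip_cons_cons, List.reverse_cons]
      rw [List.zip_append (by simp [h]), ih r' h]
      rfl

-- the port's Int-indexed splice foldr over cast offsets is the Nat-level pvSpliceAll
theorem pv_foldr_cast (ps : List (Nat × List (String × Int))) (b : List Char) :
    (ps.map (fun em : Nat × List (String × Int) => ((em.1 : Int), em.2))).foldr
      (fun em b =>
        PySem.List.slice b none (some em.1) ++
          ('[' :: (PySem.Int.toChars (((PySem.Dict.mk em.2).get? "time").getD 0) ++ ['m', 's', ']'])) ++
          PySem.List.slice b (some em.1) none) b
    = pvSpliceAll ps b := by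
  induction ps with
  | nil => rfl
  | cons em ps ih =>
    simp only [List.map_cons, List.foldr_cons, ih]
    rw [PySem.List.slice_to_natCast, PySem.List.slice_from_natCast]
    rfl

-- splicing at offsets shifted past a common prefix splices inside the suffix
theorem pv_shift (ps : List (Nat × List (String × Int))) (pre b : List Char) (c : Nat)
    (hc : pre.length = c) :
    pvSpliceAll (ps.map (fun em => (c + em.1, em.2))) (pre ++ b) = pre ++ pvSpliceAll ps b := by
  induction ps with
  | nil => rfl
  | cons em ps ih =>
    simp only [List.map_cons, pvSpliceAll, List.foldr_cons] at *
    rw [ih]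
    subst hc
    rw [List.take_length_add_append, List.drop_length_add_append]
    simp [List.append_assoc]

theorem pv_pieces_ne_nil (ws : List String) (sm : List (List (String × Int))) (h : ws ≠ []) :
    pvPieces ws sm ≠ [] := by
  cases ws with
  | nil => exact absurd rfl h
  | cons w ws' =>
    cases sm with
    | nil => simp [pvPieces]
    | cons m sm' => simp [pvPieces]

-- the main splice identity: inserting the tags at the computed offsets into the joined words
-- gives the join of the tagged pieces
theorem pv_main (ws : List String) (sm : List (List (String × Int))) :
    pvSpliceAll ((pvEndsW (ws.take sm.length) 0).zip (sm.take (ws.take sm.length).length))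
      (PySem.Chars.join [' '] (ws.map String.toList))
    = PySem.Chars.join [' '] (pvPieces ws sm) := by
  induction ws generalizing sm with
  | nil =>
    simp [pvEndsW, pvSpliceAll, pvPieces]
  | cons w ws' ih =>
    cases sm with
    | nil =>
      simp [pvEndsW, pvSpliceAll, pvPieces]
    | cons m sm' =>
      simp only [List.length_cons, List.take_succ_cons]
      have hends : pvEndsW (w :: ws'.take sm'.length) 0
          = (0 + w.toList.length) :: pvEndsW (ws'.take sm'.length) (0 + w.toList.length + 1) := rfl
      rw [hends]
      simp only [Nat.zero_add]
      rw [List.zip_cons_cons]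
      have hsp : ∀ X, pvSpliceAll ((w.toList.length, m) :: (pvEndsW (ws'.take sm'.length) (w.toList.length + 1)).zip (sm'.take (ws'.take sm'.length).length)) X
          = (pvSpliceAll ((pvEndsW (ws'.take sm'.length) (w.toList.length + 1)).zip (sm'.take (ws'.take sm'.length).length)) X).take w.toList.length
            ++ pvTagOf m
            ++ (pvSpliceAll ((pvEndsW (ws'.take sm'.length) (w.toList.length + 1)).zip (sm'.take (ws'.take sm'.length).length)) X).drop w.toList.length := by
        intro X; rfl
      rw [hsp]
      cases ws' with
      | nil =>
        simp [pvEndsW, pvSpliceAll, pvPieces, pvTag, PySem.Chars.join_singleton]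
        rw [List.take_of_length_le (by simp), List.drop_eq_nil_of_le (by simp)]
        simp
      | cons v rest =>
        -- shift the inner offsets past the prefix "w ++ ' '"
        have hshift : pvEndsW ((v :: rest).take sm'.length) (w.toList.length + 1)
            = (pvEndsW ((v :: rest).take sm'.length) 0).map
                (fun n => (w.toList.length + 1) + n) := by
          have := pv_endsW_shift ((v :: rest).take sm'.length) (w.toList.length + 1) 0
          simpa using this
        rw [hshift, List.zip_map_left]
        have hmapeq : (Prod.map (fun n => (w.toList.length + 1) + n) (id : List (String × Int) → List (String × Int)))
            = (fun em : Nat × List (String × Int) => ((w.toList.length + 1) + em.1, em.2)) := by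
          funext em; cases em; rfl
        rw [hmapeq]
        have hbase : PySem.Chars.join [' '] ((w :: v :: rest).map String.toList)
            = (w.toList ++ [' ']) ++ PySem.Chars.join [' '] ((v :: rest).map String.toList) := by
          simp [PySem.Chars.join_cons_cons, List.append_assoc]
        rw [hbase, pv_shift _ _ _ _ (by simp)]
        rw [ih sm']
        -- take/drop at the length of w on "w ++ ' ' ++ join pieces'"
        have hX : w.toList ++ [' '] ++ PySem.Chars.join [' '] (pvPieces (v :: rest) sm')
            = w.toList ++ ([' '] ++ PySem.Chars.join [' '] (pvPieces (v :: rest) sm')) := by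
          simp [List.append_assoc]
        rw [hX]
        rw [show w.toList.length = w.toList.length + 0 from rfl, List.take_length_add_append,
          List.drop_length_add_append]
        simp only [List.take_zero, List.drop_zero, List.append_nil]
        -- and the right-hand side
        have hpieces : pvPieces (w :: v :: rest) (m :: sm')
            = pvTag (w, m) :: pvPieces (v :: rest) sm' := by
          simp [pvPieces, List.zip_cons_cons]
        rw [hpieces]
        obtain ⟨q, qs, hq⟩ := List.exists_cons_of_ne_nil (pv_pieces_ne_nil (v :: rest) sm' (by simp))
        rw [hq, PySem.Chars.join_cons_cons, ← hq]
        simp [pvTag, List.append_assoc]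

-- B's result, characterised: the same join of the same pieces
theorem pv_B_eq (text : String) (sm : List (List (String × Int))) :
    add_timestamps_to_text_alt text sm
      = String.ofList (PySem.Chars.join [' '] (pvPieces (PySem.Str.split₀ text) sm)) := by
  unfold add_timestamps_to_text_alt
  simp only []
  set words := PySem.Str.split₀ text with hwords
  rw [PySem.List.len_eq sm, PySem.List.slice_to_natCast]
  have hf := pv_fold1 (words.take sm.length) [] 0
  simp only [Nat.cast_zero] at hf
  rw [hf]
  simp only [List.nil_append]
  set wk := words.take sm.length with hwk
  set ends := (pvEndsW wk 0).map (fun n : Nat => (n : Int)) with hends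
  have hendslen : PySem.List.len ends = ((wk.length : Nat) : Int) := by
    rw [PySem.List.len_eq, hends, List.length_map, pv_endsW_length]
  rw [hendslen, PySem.List.slice_to_natCast]
  set smk := sm.take wk.length with hsmk
  have hlen : ends.length = smk.length := by
    rw [hends, hsmk, List.length_map, pv_endsW_length, hwk]
    simp only [List.length_take]
    omega
  rw [pv_zip_reverse ends smk hlen, List.foldl_reverse]
  have hmap : ends.zip smk
      = ((pvEndsW wk 0).zip smk).map (fun em : Nat × List (String × Int) => ((em.1 : Int), em.2)) := by
    rw [hends, List.zip_map_left]
    rfl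
  rw [hmap, pv_foldr_cast]
  rw [hwk, hsmk, hwk, pv_main words sm]

-- ===== VERDICT (by name: the statement is the Claim_ definition above) =====
theorem add_timestamps_to_text_spec : Claim_equal_add_timestamps_to_text := by
  intro text sm _hdom _hpre
  unfold Spec_add_timestamps_to_text
  rw [pv_A_eq, pv_B_eq]
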